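-- pv_equiv track=rewrite | github.com/Pabloo22/dlfs | dlfs/convolutions/winograd_noa.py | get_list_m
-- ===== SOURCE A (Python) =====
-- def get_list_m(m: int, r: int):
--     """
--     This function generates negative and positive numbers in ascend order used for the equation m(x).
--         m(x) = x(x-1)(x+1)(x-2)...(x-∞)
--
--     Args:
--         m (int): The size of the output
--         r (int): The size of the filter
--
--      Returns:
--          A list with the numbers chosen to create the polynomial m(x).
--          [-1,1,-2,...]
--     """
--     m_values = [0]
--     i = 1
--     while len(m_values) < (m + r - 1) - 1:
--
--         if len(m_values) % 2 == 0:
--             m_values.append(i)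
--             i += 1
--
--         elif len(m_values) % 2 == 1:
--             m_values.append(-i)
--
--     return m_values
-- ===== SOURCE B (Python) =====
-- def get_list_m(m: int, r: int):
--     n = m + r - 2
--     if n < 1:
--         return [0]
--     return [-(k + 1) // 2 if k % 2 else k // 2 for k in range(n)]
-- ===== Notes on version B (the rewrite author's own statement) =====
-- stated objective: simpler
-- what changed: Replaces the while-loop state machine (growing list, parity branch, running magnitude counter i) with a closed-form index formula: element k of the length-max(1,m+r-2) list is computed independently as -(k+1)//2 if k is odd else k//2.
import Mathlib
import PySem

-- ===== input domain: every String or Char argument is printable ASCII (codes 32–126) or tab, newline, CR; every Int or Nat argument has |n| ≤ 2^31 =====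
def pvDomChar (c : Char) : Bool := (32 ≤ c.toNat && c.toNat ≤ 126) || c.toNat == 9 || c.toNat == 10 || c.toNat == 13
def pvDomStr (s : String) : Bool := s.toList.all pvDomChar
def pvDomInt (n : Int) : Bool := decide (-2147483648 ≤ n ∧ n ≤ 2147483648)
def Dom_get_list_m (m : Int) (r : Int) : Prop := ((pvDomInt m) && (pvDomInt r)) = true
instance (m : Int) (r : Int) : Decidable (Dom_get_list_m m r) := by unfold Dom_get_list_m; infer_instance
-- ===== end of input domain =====

-- B replaces A's while-loop state machine by a per-index closed form; equal output proved for all inputs.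

-- ===== PORT A =====
-- the while loop of A: state is (m_values, i); each iteration appends, so t - len decreases
def get_list_m_loop (t : Int) (acc : List Int) (i : Int) : List Int :=
  if (acc.length : Int) < t then
    if acc.length % 2 = 0 then get_list_m_loop t (acc ++ [i]) (i + 1)
    else get_list_m_loop t (acc ++ [-i]) i
  else acc
termination_by (t - acc.length).toNat
decreasing_by all_goals (simp [List.length_append]; omega)

def get_list_m (m : Int) (r : Int) : List Int :=
  get_list_m_loop ((m + r - 1) - 1) [0] 1

-- ===== PORT B =====
def get_list_m_alt (m : Int) (r : Int) : List Int :=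
  let n := m + r - 2
  if n < 1 then [0]
  else (PySem.List.pyRange 0 n 1).map (fun k =>
    if PySem.Int.mod k 2 ≠ 0 then PySem.Int.floordiv (-(k + 1)) 2
    else PySem.Int.floordiv k 2)

-- ===== PRECONDITION & SPEC =====
def Spec_get_list_m (m : Int) (r : Int) (out : List Int) : Prop := out = get_list_m_alt m r
instance (m : Int) (r : Int) (out : List Int) : Decidable (Spec_get_list_m m r out) := by unfold Spec_get_list_m; infer_instance

-- ===== CLAIM (what is proved, stated in full; the proofs are below) =====
def Claim_equal_get_list_m : Prop := ∀ (m : Int) (r : Int), Dom_get_list_m m r → Spec_get_list_m m r (get_list_m m r)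

-- ===== LEMMAS AND PROOFS =====

-- the k-th element of the alternating sequence, as a function of its index
def pvSeqElem (k : Nat) : Int :=
  if k % 2 = 1 then -(((k + 1) / 2 : Nat) : Int) else ((k / 2 : Nat) : Int)

def pvSeq (L : Nat) : List Int := (List.range L).map pvSeqElem

lemma pvSeq_snoc (L : Nat) : pvSeq (L + 1) = pvSeq L ++ [pvSeqElem L] := by
  simp [pvSeq, List.range_succ]

-- loop invariant: after the list has length L (≥ 1), it is pvSeq L and i = (L+1)/2
lemma loop_inv (t : Int) : ∀ (fuel L : Nat), (t - L).toNat ≤ fuel → 1 ≤ L →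
    get_list_m_loop t (pvSeq L) (((L + 1) / 2 : Nat) : Int) = pvSeq (max L t.toNat) := by
  intro fuel
  induction fuel with
  | zero =>
    intro L hf hL
    have hlen : (pvSeq L).length = L := by simp [pvSeq]
    rw [get_list_m_loop]
    have ht : ¬ ((pvSeq L).length : Int) < t := by rw [hlen]; omega
    rw [if_neg ht]
    have : max L t.toNat = L := by omega
    rw [this]
  | succ n ih =>
    intro L hf hL
    have hlen : (pvSeq L).length = L := by simp [pvSeq]
    by_cases ht : (L : Int) < t
    · rw [get_list_m_loop, hlen, if_pos ht]
      by_cases hp : L % 2 = 0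
      · rw [if_pos hp]
        have he : pvSeq L ++ [(((L + 1) / 2 : Nat) : Int)] = pvSeq (L + 1) := by
          rw [pvSeq_snoc]
          have : pvSeqElem L = (((L + 1) / 2 : Nat) : Int) := by
            unfold pvSeqElem
            rw [if_neg (by omega)]
            congr 1
            omega
          rw [this]
        rw [he]
        have hi : (((L + 1) / 2 : Nat) : Int) + 1 = (((L + 1 + 1) / 2 : Nat) : Int) := by
          push_cast
          omega
        rw [hi]
        have := ih (L + 1) (by omega) (by omega)
        rw [this]
        congr 1
        omega
      · rw [if_neg hp]
        have he : pvSeq L ++ [-(((L + 1) / 2 : Nat) : Int)] = pvSeq (L + 1) := by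
          rw [pvSeq_snoc]
          have : pvSeqElem L = -(((L + 1) / 2 : Nat) : Int) := by
            unfold pvSeqElem
            rw [if_pos (by omega)]
          rw [this]
        rw [he]
        have hi : (((L + 1) / 2 : Nat) : Int) = (((L + 1 + 1) / 2 : Nat) : Int) := by
          push_cast
          omega
        rw [hi]
        have := ih (L + 1) (by omega) (by omega)
        rw [this]
        congr 1
        omega
    · rw [get_list_m_loop, hlen, if_neg ht]
      have : max L t.toNat = L := by omega
      rw [this]

-- B's per-index formula agrees with pvSeqElem on natural indices
lemma alt_elem_eq (k : Nat) :
    (if PySem.Int.mod (k : Int) 2 ≠ 0 then PySem.Int.floordiv (-((k : Int) + 1)) 2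
     else PySem.Int.floordiv (k : Int) 2) = pvSeqElem k := by
  unfold pvSeqElem
  rw [show PySem.Int.mod (k : Int) 2 = (k : Int) % 2 from PySem.Int.mod_eq_emod_of_pos (by norm_num),
      show PySem.Int.floordiv (-((k : Int) + 1)) 2 = -((k : Int) + 1) / 2 from PySem.Int.floordiv_eq_ediv_of_pos (by norm_num),
      show PySem.Int.floordiv (k : Int) 2 = (k : Int) / 2 from PySem.Int.floordiv_eq_ediv_of_pos (by norm_num)]
  by_cases h : k % 2 = 1
  · rw [if_pos h, if_pos (by omega : ¬ (k : Int) % 2 = 0 )]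
    push_cast
    omega
  · rw [if_neg h, if_neg (by push_cast; omega : ¬ ¬ (k : Int) % 2 = 0)]
    omega

-- B's result is pvSeq of the (clamped) target length
lemma alt_eq_pvSeq (m r : Int) : get_list_m_alt m r = pvSeq (max 1 (m + r - 2).toNat) := by
  unfold get_list_m_alt
  by_cases h : m + r - 2 < 1
  · rw [if_pos h]
    have : max 1 (m + r - 2).toNat = 1 := by omega
    rw [this]
    simp [pvSeq, pvSeqElem]
  · rw [if_neg h]
    have hmax : max 1 (m + r - 2).toNat = (m + r - 2).toNat := by omega
    rw [hmax, PySem.List.pyRange_one]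
    simp only [sub_zero, pvSeq, List.map_map]
    apply List.map_congr_left
    intro k _
    simp only [Function.comp_apply, zero_add]
    exact alt_elem_eq k

-- ===== VERDICT (by name: the statement is the Claim_ definition above) =====
theorem get_list_m_spec : Claim_equal_get_list_m := by
  intro m r _
  unfold Spec_get_list_m get_list_m
  have h0 : ([(0 : Int)] : List Int) = pvSeq 1 := by simp [pvSeq, pvSeqElem]
  have h1 := loop_inv ((m + r - 1) - 1) ((m + r - 1) - 1).toNat 1 (by omega) (by omega)
  norm_num at h1
  rw [h0, h1, alt_eq_pvSeq]
  congr 1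
  omega
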